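-- pv_equiv track=rewrite | github.com/jazy510/noncoding3torus | UTILS.py | interleave_messages
-- ===== SOURCE A (Python) =====
-- def interleave_messages(message1, message2, interleave_size):
--     '''
--        Given two messages, read (interleave_size) bases of first, then (interleave_size) of the second
--         and combine them into a new string.
--         Continue over length of both messages.
--         messages must be of same length
--         messages must be of % interleave_size == 0
--     '''
--     if len(message1) %interleave_size != 0 or len(message2) %interleave_size != 0:
--         raise Exception("Message Lengths must have zero remainder compared to interleave size")
--
--     if len(message1) != len(message2):
--         raise Exception("Messages must be of same length to interleave")
--
--     return_message = ''
--     loc = -1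
--     while True:
--         loc += 1
--         return_message += message1[loc*interleave_size:loc*interleave_size+interleave_size]
--         return_message += message2[loc*interleave_size:loc*interleave_size+interleave_size]
--         if loc*interleave_size+interleave_size > len(message1):
--             break
--     return return_message
-- ===== SOURCE B (Python) =====
-- def interleave_messages(message1, message2, interleave_size):
--     if len(message1) % interleave_size != 0 or len(message2) % interleave_size != 0:
--         raise Exception("Message Lengths must have zero remainder compared to interleave size")
--     if len(message1) != len(message2):
--         raise Exception("Messages must be of same length to interleave")
--     # Build the output character by character: position j of the result comes from a
--     # closed-form source index, no slicing or concatenation of chunks at all.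
--     out = []
--     for j in range(2 * len(message1)):
--         block, off = divmod(j, interleave_size)
--         src = message1 if block % 2 == 0 else message2
--         out.append(src[(block // 2) * interleave_size + off])
--     return ''.join(out)
-- ===== Notes on version B (the rewrite author's own statement) =====
-- stated objective: alternative
-- what changed: Instead of A's while-loop that slices alternating chunks and concatenates them onto a growing string, B computes each output character directly: it maps every output position j through the closed-form index (j//size//2)*size + j%size into message1 or message2 according to the parity of j//size, then joins once.
import Mathlib
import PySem

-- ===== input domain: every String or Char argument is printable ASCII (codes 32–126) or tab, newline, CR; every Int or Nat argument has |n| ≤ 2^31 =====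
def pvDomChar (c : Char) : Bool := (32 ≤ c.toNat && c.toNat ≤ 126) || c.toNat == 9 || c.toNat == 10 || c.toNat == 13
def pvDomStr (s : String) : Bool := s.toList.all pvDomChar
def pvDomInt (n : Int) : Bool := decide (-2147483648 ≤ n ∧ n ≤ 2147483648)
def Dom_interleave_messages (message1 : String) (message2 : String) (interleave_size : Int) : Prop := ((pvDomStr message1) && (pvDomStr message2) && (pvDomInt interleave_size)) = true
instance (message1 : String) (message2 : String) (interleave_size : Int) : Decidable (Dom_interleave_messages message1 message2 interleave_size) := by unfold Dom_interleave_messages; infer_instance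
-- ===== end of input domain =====

-- B builds the output character by character from a closed-form index map (source and position
-- computed from the output position by div/mod), instead of A's while-loop that slices alternating
-- chunks and concatenates them onto a growing string (objective: alternative).


-- ===== PORT A =====
-- A's while-True loop: loc starts at -1 and is incremented at the top of the body, so the
-- recursion starts at loc = 0; fuel (length + 2) only makes the recursion total — under
-- Pre_ (positive size) it is never exhausted.
def pvLoopA (l1 l2 : List Char) (s : Int) : Int → List Char → Nat → List Char
  | _, acc, 0 => acc
  | loc, acc, Nat.succ fuel =>
    let acc2 := acc ++ PySem.List.slice l1 (some (loc * s)) (some (loc * s + s))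
                    ++ PySem.List.slice l2 (some (loc * s)) (some (loc * s + s))
    if loc * s + s > (l1.length : Int) then acc2
    else pvLoopA l1 l2 s (loc + 1) acc2 fuel

-- the two 'raise' branches return "" (those inputs are excluded by Pre_)
def interleave_messages (message1 : String) (message2 : String) (interleave_size : Int) : String :=
  if PySem.Int.mod (PySem.Str.len message1) interleave_size ≠ 0 ∨
     PySem.Int.mod (PySem.Str.len message2) interleave_size ≠ 0 then ""
  else if PySem.Str.len message1 ≠ PySem.Str.len message2 then ""
  else String.ofList (pvLoopA message1.toList message2.toList interleave_size 0 [] (message1.toList.length + 2))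

-- ===== PORT B =====
-- the loop body of Source B: divmod(j, size), pick the source by parity of the block, index it
-- (pyGetD's default is never reached under Pre_: the computed index is always in range)
def pvPick (l1 l2 : List Char) (s j : Int) : Char :=
  let block := PySem.Int.floordiv j s
  let off := PySem.Int.mod j s
  let src := if PySem.Int.mod block 2 = 0 then l1 else l2
  PySem.List.pyGetD src (PySem.Int.floordiv block 2 * s + off) ' '

def interleave_messages_alt (message1 : String) (message2 : String) (interleave_size : Int) : String :=
  if PySem.Int.mod (PySem.Str.len message1) interleave_size ≠ 0 ∨
     PySem.Int.mod (PySem.Str.len message2) interleave_size ≠ 0 then ""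
  else if PySem.Str.len message1 ≠ PySem.Str.len message2 then ""
  else String.ofList ((PySem.List.pyRange 0 (2 * PySem.Str.len message1) 1).map
        (pvPick message1.toList message2.toList interleave_size))

-- ===== PRECONDITION & SPEC =====
-- Pre_ excludes only inputs on which A does not return: size 0 (ZeroDivisionError), lengths not
-- divisible by the size or unequal lengths (explicit Exception), and negative size, on which
-- A's while-loop never reaches its break condition (infinite loop).
def Pre_interleave_messages (message1 : String) (message2 : String) (interleave_size : Int) : Prop :=
  0 < interleave_size ∧
  PySem.Int.mod (PySem.Str.len message1) interleave_size = 0 ∧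
  PySem.Int.mod (PySem.Str.len message2) interleave_size = 0 ∧
  PySem.Str.len message1 = PySem.Str.len message2
instance (message1 : String) (message2 : String) (interleave_size : Int) : Decidable (Pre_interleave_messages message1 message2 interleave_size) := by unfold Pre_interleave_messages; infer_instance

def pvWitness_interleave_messages : String × String × Int := ("abcd", "wxyz", 2)

def Spec_interleave_messages (message1 : String) (message2 : String) (interleave_size : Int) (out : String) : Prop := out = interleave_messages_alt message1 message2 interleave_size
instance (message1 : String) (message2 : String) (interleave_size : Int) (out : String) : Decidable (Spec_interleave_messages message1 message2 interleave_size out) := by unfold Spec_interleave_messages; infer_instance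

-- ===== CLAIM (what is proved, stated in full; the proofs are below) =====
def Claim_equal_interleave_messages : Prop := ∀ (message1 : String) (message2 : String) (interleave_size : Int), Dom_interleave_messages message1 message2 interleave_size → Pre_interleave_messages message1 message2 interleave_size → Spec_interleave_messages message1 message2 interleave_size (interleave_messages message1 message2 interleave_size)

-- ===== LEMMAS AND PROOFS =====

-- A's loop, started at chunk index loc with c chunks remaining, appends exactly those chunks
theorem pvLoopA_eq (l1 l2 : List Char) (s : Nat) (hs : 0 < s)
    (h2 : l2.length = l1.length) :
    ∀ (c loc : Nat) (acc : List Char) (fuel : Nat),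
      l1.length = (loc + c) * s → c + 1 ≤ fuel →
      pvLoopA l1 l2 (s : Int) (loc : Int) acc fuel =
        acc ++ ((List.range c).map (fun i =>
          PySem.List.slice l1 (some (((loc + i) * s : Nat) : Int)) (some ((((loc + i) * s : Nat) : Int) + (s : Int))) ++
          PySem.List.slice l2 (some (((loc + i) * s : Nat) : Int)) (some ((((loc + i) * s : Nat) : Int) + (s : Int))))).flatten := by
  intro c
  induction c with
  | zero =>
    intro loc acc fuel hlen hfuel
    rw [Nat.add_zero] at hlen
    obtain ⟨fuel', rfl⟩ : ∃ f, fuel = f + 1 := ⟨fuel - 1, by omega⟩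
    simp only [pvLoopA]
    have hbreak : ((loc : Int) * s + s > (l1.length : Int)) := by
      rw [hlen]; push_cast; nlinarith
    rw [if_pos hbreak]
    have e1 : ((loc : Int) * s) = ((loc * s : Nat) : Int) := by push_cast; ring
    rw [e1, PySem.List.slice_natCast_add, PySem.List.slice_natCast_add]
    have hd1 : l1.drop (loc * s) = [] := List.drop_eq_nil_of_le hlen.le
    have hd2 : l2.drop (loc * s) = [] := List.drop_eq_nil_of_le (by rw [h2]; exact hlen.le)
    simp [hd1, hd2]
  | succ c ih =>
    intro loc acc fuel hlen hfuel
    obtain ⟨fuel', rfl⟩ : ∃ f, fuel = f + 1 := ⟨fuel - 1, by omega⟩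
    simp only [pvLoopA]
    have hnobreak : ¬ ((loc : Int) * s + s > (l1.length : Int)) := by
      rw [hlen]; push_cast; nlinarith
    rw [if_neg hnobreak]
    have hcast : ((loc : Int) + 1) = ((loc + 1 : Nat) : Int) := by push_cast; ring
    rw [hcast, ih (loc + 1) _ fuel' (by rw [hlen]; ring) (by omega)]
    rw [List.range_succ_eq_map]
    have e1 : ((loc : Int) * s) = ((loc * s : Nat) : Int) := by push_cast; ring
    have ha : (loc + 0) * s = loc * s := by ring
    simp only [List.map_cons, List.map_map, List.flatten_cons, List.append_assoc, ha, e1]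
    congr 3
    congr 1
    apply List.map_congr_left
    intro i _
    have hb : loc + 1 + i = loc + (i + 1) := by omega
    simp [Function.comp, hb]

-- a chunk of the source, as the per-position reads B performs
theorem pvTakeDropEqMapGetD (l : List Char) (a s : Nat) (h : a + s ≤ l.length) :
    (l.drop a).take s = (List.range s).map (fun t => l.getD (a + t) ' ') := by
  apply List.ext_getElem
  · simp only [List.length_take, List.length_drop, List.length_map, List.length_range]
    omega
  · intro i h1 h2
    simp only [List.length_take, List.length_drop] at h1
    simp only [List.getElem_take, List.getElem_drop, List.getElem_map, List.getElem_range]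
    rw [List.getD_eq_getElem _ _ (by omega)]

-- B's index map on a position in the first half of block k reads message1 at k*s + t
theorem pvPick_lo (l1 l2 : List Char) (sN k t : Nat) (hs : 0 < sN) (ht : t < sN) :
    pvPick l1 l2 (sN : Int) ((k * (2 * sN) + t : Nat) : Int) = l1.getD (k * sN + t) ' ' := by
  have hdiv : (k * (2 * sN) + t) / sN = 2 * k := by
    rw [show k * (2 * sN) + t = sN * (2 * k) + t by ring, Nat.mul_add_div hs,
        Nat.div_eq_of_lt ht]
    omega
  have hmod : (k * (2 * sN) + t) % sN = t := by
    rw [show k * (2 * sN) + t = sN * (2 * k) + t by ring, Nat.mul_add_mod,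
        Nat.mod_eq_of_lt ht]
  simp only [pvPick, PySem.Int.floordiv_natCast, PySem.Int.mod_natCast, hdiv, hmod]
  rw [PySem.Int.mod_eq_emod_of_pos (by norm_num), PySem.Int.floordiv_eq_ediv_of_pos (by norm_num),
      if_pos (by omega : ((2 * k : Nat) : Int) % 2 = 0),
      show ((2 * k : Nat) : Int) / 2 = (k : Int) by omega,
      show (k : Int) * ((sN : Nat) : Int) + ((t : Nat) : Int) = ((k * sN + t : Nat) : Int) by push_cast; ring,
      PySem.List.pyGetD_natCast]

-- B's index map on a position in the second half of block k reads message2 at k*s + t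
theorem pvPick_hi (l1 l2 : List Char) (sN k t : Nat) (hs : 0 < sN) (ht : t < sN) :
    pvPick l1 l2 (sN : Int) ((k * (2 * sN) + (sN + t) : Nat) : Int) = l2.getD (k * sN + t) ' ' := by
  have hdiv : (k * (2 * sN) + (sN + t)) / sN = 2 * k + 1 := by
    rw [show k * (2 * sN) + (sN + t) = sN * (2 * k + 1) + t by ring, Nat.mul_add_div hs,
        Nat.div_eq_of_lt ht]
  have hmod : (k * (2 * sN) + (sN + t)) % sN = t := by
    rw [show k * (2 * sN) + (sN + t) = sN * (2 * k + 1) + t by ring, Nat.mul_add_mod,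
        Nat.mod_eq_of_lt ht]
  simp only [pvPick, PySem.Int.floordiv_natCast, PySem.Int.mod_natCast, hdiv, hmod]
  rw [PySem.Int.mod_eq_emod_of_pos (by norm_num), PySem.Int.floordiv_eq_ediv_of_pos (by norm_num),
      if_neg (by omega : ¬ ((2 * k + 1 : Nat) : Int) % 2 = 0),
      show ((2 * k + 1 : Nat) : Int) / 2 = (k : Int) by omega,
      show (k : Int) * ((sN : Nat) : Int) + ((t : Nat) : Int) = ((k * sN + t : Nat) : Int) by push_cast; ring,
      PySem.List.pyGetD_natCast]

-- the 2*s positions of block k evaluate to chunk k of message1 followed by chunk k of message2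
theorem pvChunkEq (l1 l2 : List Char) (sN k : Nat) (hs : 0 < sN)
    (h1 : (k + 1) * sN ≤ l1.length) (h2 : (k + 1) * sN ≤ l2.length) :
    (List.range (2 * sN)).map (fun t => pvPick l1 l2 (sN : Int) ((k * (2 * sN) + t : Nat) : Int)) =
      (l1.drop (k * sN)).take sN ++ (l2.drop (k * sN)).take sN := by
  have hsplit : List.range (2 * sN) = List.range sN ++ (List.range sN).map (sN + ·) := by
    rw [show 2 * sN = sN + sN by ring]; exact List.range_add
  rw [hsplit, List.map_append, List.map_map]
  congr 1
  · rw [pvTakeDropEqMapGetD l1 (k * sN) sN (by nlinarith)]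
    apply List.map_congr_left
    intro t htm
    exact pvPick_lo l1 l2 sN k t hs (List.mem_range.mp htm)
  · rw [pvTakeDropEqMapGetD l2 (k * sN) sN (by nlinarith)]
    apply List.map_congr_left
    intro t htm
    simp only [Function.comp_apply]
    exact pvPick_hi l1 l2 sN k t hs (List.mem_range.mp htm)

-- B's single pass over all 2*k*s positions is exactly the flattened chunk list
theorem pvAltFlatten (l1 l2 : List Char) (sN : Nat) (hs : 0 < sN) :
    ∀ k, k * sN ≤ l1.length → k * sN ≤ l2.length →
    (List.range (k * (2 * sN))).map (fun t => pvPick l1 l2 (sN : Int) ((t : Nat) : Int)) =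
      ((List.range k).map (fun i => (l1.drop (i * sN)).take sN ++ (l2.drop (i * sN)).take sN)).flatten := by
  intro k
  induction k with
  | zero => simp
  | succ k ih =>
    intro h1 h2
    rw [show (k + 1) * (2 * sN) = k * (2 * sN) + 2 * sN by ring, List.range_add,
        List.map_append, List.map_map,
        ih (by nlinarith) (by nlinarith),
        List.range_succ, List.map_append, List.flatten_append]
    congr 1
    simp only [List.map_singleton, List.flatten_cons, List.flatten_nil, List.append_nil]
    rw [← pvChunkEq l1 l2 sN k hs h1 h2]
    rfl

-- ===== VERDICT (by name: the statement is the Claim_ definition above) =====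
theorem interleave_messages_spec : Claim_equal_interleave_messages := by
  intro m1 m2 s _hDom hPre
  obtain ⟨hs, hm1, hm2, hlen⟩ := hPre
  unfold Spec_interleave_messages interleave_messages interleave_messages_alt
  simp only [PySem.Str.len_eq, String.length_toList] at hm1 hm2 hlen
  have hlenN : m1.length = m2.length := by exact_mod_cast hlen
  rw [if_neg (by simp [hm1, hm2]), if_neg (by simp [hlenN])]
  rw [if_neg (by simp [hm1, hm2]), if_neg (by simp [hlenN])]
  have hsN : s = ((s.toNat : Nat) : Int) := by omega
  set sN := s.toNat with hsNdef
  have hsNpos : 0 < sN := by omega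
  have hlen1 : PySem.Str.len m1 = (m1.toList.length : Int) := by simp [PySem.Str.len_eq]
  have hll : m2.toList.length = m1.toList.length := by simp [hlenN]
  have hdvd : sN ∣ m1.toList.length := by
    have h := (PySem.Int.mod_eq_zero_iff_dvd _ _).mp hm1
    rw [hsN] at h
    have h2 : ((sN : Nat) : Int) ∣ ((m1.toList.length : Nat) : Int) := by
      simpa using h
    exact_mod_cast h2
  obtain ⟨k, hk⟩ := hdvd
  have hk' : m1.toList.length = k * sN := by rw [hk]; ring
  congr 1
  rw [hsN]
  -- A side: the loop produces the flattened chunk list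
  have hA := pvLoopA_eq m1.toList m2.toList sN hsNpos hll k 0 [] (m1.toList.length + 2)
      (by rw [hk']; ring)
      (by have := Nat.le_mul_of_pos_right k hsNpos; omega)
  simp only [Nat.cast_zero, Nat.zero_add, List.nil_append] at hA
  rw [hA]
  -- B side: the range over all output positions
  rw [hlen1, hk']
  rw [show 2 * ((k * sN : Nat) : Int) = ((k * (2 * sN) : Nat) : Int) by push_cast; ring]
  rw [PySem.List.pyRange_zero_natCast, List.map_map]
  simp only [Function.comp_def]
  rw [pvAltFlatten m1.toList m2.toList sN hsNpos k (le_of_eq hk'.symm)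
      (by rw [hll]; exact le_of_eq hk'.symm)]
  congr 1
  apply List.map_congr_left
  intro i _
  rw [PySem.List.slice_natCast_add, PySem.List.slice_natCast_add]
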